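-- pv_equiv track=rewrite | github.com/tinykishore/CSE3812-231-D | Hill-Climbing-Steepest-Ascent.py | state_generator_steepest_ascent
-- ===== SOURCE A (Python) =====
-- def calc_cost(_state_: list):
--     # Initializing the local cost variable
--     _cost_ = 0
--     # Calculating the cost with nested for loop
--     for i in range(len(_state_)):
--         for j in range(i + 1, len(_state_)):
--             # If the value at index i is greater than the value at index j,
--             # then increment the cost
--             # Determine total misplaced values
--             if _state_[i] > _state_[j]:
--                 _cost_ += 1
--     return _cost_
--
-- def state_generator_steepest_ascent(_state_: list):
--     # Initializing the local current cost variable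
--     current_cost = calc_cost(_state_)
--
--     # Generating the next state with nested for loop
--     for i in range(len(_state_)):
--         for j in range(i + 1, len(_state_)):
--             # Swap the values at index i and j and store the cost of the new state
--             swap(_state_, i, j)
--             new_cost = calc_cost(_state_)
--
--             # If the new cost is less than the current cost, then update the current cost
--             # otherwise, swap the values back
--             if new_cost < current_cost:
--                 current_cost = new_cost
--             else:
--                 swap(_state_, i, j)
--     # Return the next state and the cost of the next state
--     return _state_, current_cost
--
-- def swap(_state_: list, i: int, j: int):
--     _state_[i], _state_[j] = _state_[j], _state_[i]
-- ===== SOURCE B (Python) =====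
-- def state_generator_steepest_ascent(_state_: list):
--     n = len(_state_)
--     # initial inversion count: for each position j, count earlier larger elements
--     cost = 0
--     for j in range(n):
--         for p in range(j):
--             if _state_[p] > _state_[j]:
--                 cost += 1
--     # greedy scan over pairs; update the inversion count incrementally on a swap
--     for i in range(n):
--         for j in range(i + 1, n):
--             a, b = _state_[i], _state_[j]
--             delta = (1 if b > a else 0) - (1 if a > b else 0)
--             for k in range(i + 1, j):
--                 c = _state_[k]
--                 delta += ((1 if b > c else 0) + (1 if c > a else 0)
--                           - (1 if a > c else 0) - (1 if c > b else 0))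
--             if delta < 0:
--                 _state_[i], _state_[j] = b, a
--                 cost += delta
--     return _state_, cost
-- ===== Notes on version B (the rewrite author's own statement) =====
-- stated objective: faster
-- what changed: Instead of recomputing the full O(n^2) inversion cost after every trial swap (and undoing rejected swaps), B computes the cost change of a swap (i,j) in O(j-i) from only the elements between i and j and updates the running cost incrementally, never swapping back.
import Mathlib
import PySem

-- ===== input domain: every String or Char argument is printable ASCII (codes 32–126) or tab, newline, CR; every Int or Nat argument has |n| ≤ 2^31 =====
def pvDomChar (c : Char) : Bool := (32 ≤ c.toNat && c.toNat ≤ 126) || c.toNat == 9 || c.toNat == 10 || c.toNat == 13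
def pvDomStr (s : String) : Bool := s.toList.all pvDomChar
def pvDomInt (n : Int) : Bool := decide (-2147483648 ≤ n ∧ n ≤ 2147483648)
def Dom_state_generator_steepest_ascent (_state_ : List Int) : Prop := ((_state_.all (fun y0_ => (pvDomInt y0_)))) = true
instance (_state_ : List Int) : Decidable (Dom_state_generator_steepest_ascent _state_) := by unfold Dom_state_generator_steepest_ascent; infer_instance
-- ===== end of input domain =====

-- B replaces A's full O(n^2) cost recompute per trial swap (with swap-back) by an O(j-i)
-- incremental cost delta; equivalence is about the return value (both Pythons also mutate
-- the argument list in place, identically).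

-- ===== PORT A =====
-- swap(_state_, i, j)
def pySwapA (s : List Int) (i j : Nat) : List Int :=
  (s.set i (s.getD j 0)).set j (s.getD i 0)

-- calc_cost: nested loops over i, j in range(i+1, len)
def calc_cost (s : List Int) : Int :=
  (List.range s.length).foldl (fun c i =>
    (List.range' (i + 1) (s.length - (i + 1))).foldl (fun c j =>
      if s.getD i 0 > s.getD j 0 then c + 1 else c) c) 0

def state_generator_steepest_ascent (_state_ : List Int) : List Int × Int :=
  let n := _state_.length
  (List.range n).foldl (fun st i =>
    (List.range' (i + 1) (n - (i + 1))).foldl (fun st j =>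
      let s' := pySwapA st.1 i j
      let nc := calc_cost s'
      if nc < st.2 then (s', nc) else (pySwapA s' i j, st.2)) st)
    (_state_, calc_cost _state_)

-- ===== PORT B =====
-- initial inversion count: for each j, count earlier larger elements
def invCountB (s : List Int) : Int :=
  (List.range s.length).foldl (fun c j =>
    (List.range j).foldl (fun c p =>
      if s.getD p 0 > s.getD j 0 then c + 1 else c) c) 0

-- the cost change of swapping positions i < j, from the elements strictly between them
def deltaB (s : List Int) (i j : Nat) : Int :=
  let a := s.getD i 0
  let b := s.getD j 0
  (List.range' (i + 1) (j - (i + 1))).foldl (fun d k =>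
    let c := s.getD k 0
    d + ((if b > c then 1 else 0) + (if c > a then 1 else 0)
       - (if a > c then 1 else 0) - (if c > b then 1 else 0)))
    ((if b > a then 1 else 0) - (if a > b then 1 else 0))

def state_generator_steepest_ascent_alt (_state_ : List Int) : List Int × Int :=
  let n := _state_.length
  (List.range n).foldl (fun st i =>
    (List.range' (i + 1) (n - (i + 1))).foldl (fun st j =>
      let a := st.1.getD i 0
      let b := st.1.getD j 0
      let d := deltaB st.1 i j
      if d < 0 then ((st.1.set i b).set j a, st.2 + d) else st) st)
    (_state_, invCountB _state_)

-- ===== PRECONDITION & SPEC =====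
def Spec_state_generator_steepest_ascent (_state_ : List Int) (out : List Int × Int) : Prop := out = state_generator_steepest_ascent_alt _state_
instance (_state_ : List Int) (out : List Int × Int) : Decidable (Spec_state_generator_steepest_ascent _state_ out) := by unfold Spec_state_generator_steepest_ascent; infer_instance

-- ===== CLAIM (what is proved, stated in full; the proofs are below) =====
def Claim_equal_state_generator_steepest_ascent : Prop := ∀ (_state_ : List Int), Dom_state_generator_steepest_ascent _state_ → Spec_state_generator_steepest_ascent _state_ (state_generator_steepest_ascent _state_)

-- ===== LEMMAS AND PROOFS =====

-- index function of a list
def uL (s : List Int) (p : Nat) : Int := s.getD p 0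

-- inversion pair indicator
def tI (u : Nat → Int) (p q : Nat) : Int := if u p > u q then 1 else 0

-- column sum and total inversion count as Finset sums
def colS (u : Nat → Int) (q : Nat) : Int := ∑ p ∈ Finset.range q, tI u p q
def totC (u : Nat → Int) (n : Nat) : Int := ∑ q ∈ Finset.range n, colS u q

def swapIdx (i j p : Nat) : Nat := if p = i then j else if p = j then i else p

def ΔI (u : Nat → Int) (i j : Nat) : Int :=
  (tI u j i - tI u i j) +
  ∑ k ∈ Finset.Ico (i + 1) j, (tI u j k + tI u k i - tI u i k - tI u k j)

-- generic fold-to-sum bridges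
lemma foldl_add_sum (f : Nat → Int) (l : List Nat) (c0 : Int) :
    l.foldl (fun c x => c + f x) c0 = c0 + (l.map f).sum := by
  induction l generalizing c0 with
  | nil => simp
  | cons h t ih => simp [ih, add_assoc]

lemma sum_map_range (f : Nat → Int) (n : Nat) :
    ((List.range n).map f).sum = ∑ x ∈ Finset.range n, f x := by
  induction n with
  | zero => simp
  | succ m ih => simp [List.range_succ, Finset.sum_range_succ, ih]

lemma sum_map_range' (f : Nat → Int) (a m : Nat) :
    ((List.range' a m).map f).sum = ∑ x ∈ Finset.Ico a (a + m), f x := by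
  induction m generalizing a with
  | zero => simp
  | succ m ih =>
      rw [List.range'_succ]
      simp only [List.map_cons, List.sum_cons, ih]
      have e : a + (m + 1) = a + 1 + m := by omega
      rw [e, Finset.sum_eq_sum_Ico_succ_bot (a := a) (b := a + 1 + m) (by omega) f]

lemma foldl_nested {σ : Type} (f : σ → Nat → Nat → σ) (l : List Nat) (g : Nat → List Nat) (init : σ) :
    l.foldl (fun st i => (g i).foldl (fun st j => f st i j) st) init
      = (l.flatMap (fun i => (g i).map (fun j => (i, j)))).foldl (fun st p => f st p.1 p.2) init := by
  induction l generalizing init with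
  | nil => rfl
  | cons h t ih => simp [List.foldl_append, List.foldl_map, ih]

-- swap a list's index function
lemma uL_swap (s : List Int) (i j : Nat) (hi : i < s.length) (hj : j < s.length) :
    uL (pySwapA s i j) = fun p => uL s (swapIdx i j p) := by
  funext p
  simp only [uL, pySwapA, swapIdx]
  simp only [List.getD_eq_getElem?_getD, List.getElem?_set, List.length_set]
  split_ifs <;> (try omega) <;> simp only [Option.getD_some] <;> (try rfl) <;> (congr 2 <;> omega)

lemma len_swap (s : List Int) (i j : Nat) : (pySwapA s i j).length = s.length := by
  simp [pySwapA]

lemma swap_swap (s : List Int) (i j : Nat) (hi : i < s.length) (hj : j < s.length) (hne : i ≠ j) :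
    pySwapA (pySwapA s i j) i j = s := by
  simp only [pySwapA]
  apply List.ext_getElem <;> simp
  intro p hp _
  simp only [List.getElem_set, List.getElem?_set, List.length_set]
  split_ifs <;> first | omega | simp_all

-- splitting a range sum at one interior point
lemma splitRange (f : Nat → Int) (m c : Nat) (h : c < m) :
    ∑ p ∈ Finset.range m, f p
      = ∑ p ∈ Finset.range c, f p + f c + ∑ p ∈ Finset.Ico (c + 1) m, f p := by
  rw [Finset.range_eq_Ico, ← Finset.sum_Ico_consecutive f (Nat.zero_le c) (le_of_lt h),
    Finset.sum_eq_sum_Ico_succ_bot (a := c) (b := m) h f, ← Finset.range_eq_Ico]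
  ring

-- splitting a range sum at two interior points
lemma split2 (f : Nat → Int) (n i j : Nat) (hij : i < j) (hj : j < n) :
    ∑ q ∈ Finset.range n, f q
      = ∑ q ∈ Finset.range i, f q + f i + ∑ q ∈ Finset.Ico (i + 1) j, f q + f j
        + ∑ q ∈ Finset.Ico (j + 1) n, f q := by
  rw [splitRange f n i (by omega), ← Finset.sum_Ico_consecutive f (by omega : i + 1 ≤ j) (by omega : j ≤ n),
    Finset.sum_eq_sum_Ico_succ_bot (a := j) (b := n) hj f]
  ring

lemma ite_add_one (P : Prop) [Decidable P] (c : Int) :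
    (if P then c + 1 else c) = c + (if P then 1 else 0) := by
  split <;> ring

-- calc_cost equals the Finset inversion count
lemma calc_cost_eq (s : List Int) : calc_cost s = totC (uL s) s.length := by
  unfold calc_cost
  have h1 : ∀ (i : Nat) (c : Int),
      (List.range' (i + 1) (s.length - (i + 1))).foldl
        (fun c j => if s.getD i 0 > s.getD j 0 then c + 1 else c) c
      = c + ∑ j ∈ Finset.Ico (i + 1) s.length, tI (uL s) i j := by
    intro i c
    have hf : (fun (c : Int) j => if s.getD i 0 > s.getD j 0 then c + 1 else c)
        = fun c j => c + tI (uL s) i j := by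
      funext c j
      exact ite_add_one _ c
    rw [hf, foldl_add_sum, sum_map_range']
    congr 1
    apply Finset.sum_congr ?_ (fun _ _ => rfl)
    apply Finset.ext
    intro x
    simp only [Finset.mem_Ico]
    omega
  have h2 : (fun (c : Int) i =>
      (List.range' (i + 1) (s.length - (i + 1))).foldl
        (fun c j => if s.getD i 0 > s.getD j 0 then c + 1 else c) c)
      = fun c i => c + ∑ j ∈ Finset.Ico (i + 1) s.length, tI (uL s) i j := by
    funext c i; exact h1 i c
  rw [h2, foldl_add_sum, sum_map_range, zero_add]
  rw [Finset.sum_comm' (s' := fun q => Finset.range q) (t' := Finset.range s.length)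
    (by intro x y; simp only [Finset.mem_range, Finset.mem_Ico]; omega)]
  rfl

-- invCountB equals the Finset inversion count
lemma invCountB_eq (s : List Int) : invCountB s = totC (uL s) s.length := by
  unfold invCountB
  have h1 : ∀ (j : Nat) (c : Int),
      (List.range j).foldl (fun c p => if s.getD p 0 > s.getD j 0 then c + 1 else c) c
      = c + colS (uL s) j := by
    intro j c
    have hf : (fun (c : Int) p => if s.getD p 0 > s.getD j 0 then c + 1 else c)
        = fun c p => c + tI (uL s) p j := by
      funext c p
      exact ite_add_one _ c
    rw [hf, foldl_add_sum, sum_map_range]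
    rfl
  have h2 : (fun (c : Int) j =>
      (List.range j).foldl (fun c p => if s.getD p 0 > s.getD j 0 then c + 1 else c) c)
      = fun c j => c + colS (uL s) j := by
    funext c j; exact h1 j c
  rw [h2, foldl_add_sum, sum_map_range, zero_add]
  rfl

-- deltaB equals ΔI
lemma deltaB_eq (s : List Int) (i j : Nat) (hij : i < j) :
    deltaB s i j = ΔI (uL s) i j := by
  unfold deltaB ΔI
  simp only []
  have hf : (fun (d : Int) k =>
      d + ((if s.getD j 0 > s.getD k 0 then (1:Int) else 0) + (if s.getD k 0 > s.getD i 0 then 1 else 0)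
        - (if s.getD i 0 > s.getD k 0 then 1 else 0) - (if s.getD k 0 > s.getD j 0 then 1 else 0)))
      = fun d k => d + (tI (uL s) j k + tI (uL s) k i - tI (uL s) i k - tI (uL s) k j) := by
    funext d k; rfl
  rw [hf, foldl_add_sum, sum_map_range']
  have he : Finset.Ico (i + 1) (i + 1 + (j - (i + 1))) = Finset.Ico (i + 1) j := by
    apply Finset.ext; intro x; simp only [Finset.mem_Ico]; omega
  rw [he]
  rfl

-- the key counting lemma: the inversion count after one swap
lemma totC_swap (u : Nat → Int) (n i j : Nat) (hij : i < j) (hj : j < n) :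
    totC (fun p => u (swapIdx i j p)) n = totC u n + ΔI u i j := by
  set u' : Nat → Int := fun p => u (swapIdx i j p) with hu'
  have hne : i ≠ j := by omega
  have hui : u' i = u j := by simp [hu', swapIdx]
  have huj : u' j = u i := by simp [hu', swapIdx, Ne.symm hne]
  have hup : ∀ p, p ≠ i → p ≠ j → u' p = u p := by
    intro p h1 h2; simp [hu', swapIdx, h1, h2]
  -- the per-column change away from columns i and j
  have hcol : ∀ q, q ≠ i → q ≠ j →
      colS u' q = colS u q + (if i < q then tI u j q - tI u i q else 0)
        + (if j < q then -(tI u j q - tI u i q) else 0) := by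
    intro q hq1 hq2
    have hq : u' q = u q := hup q hq1 hq2
    have hterm : ∀ p, tI u' p q
        = tI u p q + (if p = i then tI u j q - tI u i q else 0)
          + (if p = j then -(tI u j q - tI u i q) else 0) := by
      intro p
      by_cases h1 : p = i
      · subst h1
        simp [tI, hui, hq, hne]
      · by_cases h2 : p = j
        · subst h2
          simp [tI, huj, hq, h1]
          try ring
        · simp [tI, hup p h1 h2, hq, h1, h2]
    unfold colS
    rw [Finset.sum_congr rfl (fun p _ => hterm p)]
    rw [Finset.sum_add_distrib, Finset.sum_add_distrib,
      Finset.sum_ite_eq' (Finset.range q) i (fun _ => tI u j q - tI u i q),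
      Finset.sum_ite_eq' (Finset.range q) j (fun _ => -(tI u j q - tI u i q))]
    simp only [Finset.mem_range]
    try rfl
    try ring
  -- column i of the swapped list
  have hcoli : colS u' i = ∑ p ∈ Finset.range i, tI u p j := by
    unfold colS
    apply Finset.sum_congr rfl
    intro p hp
    simp only [Finset.mem_range] at hp
    simp [tI, hup p (by omega) (by omega), hui]
  -- column j of the swapped list
  have hcolj : colS u' j = ∑ p ∈ Finset.range j, tI u p i + tI u j i := by
    unfold colS
    have hterm : ∀ p ∈ Finset.range j, tI u' p j
        = tI u p i + (if p = i then tI u j i - tI u i i else 0) := by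
      intro p hp
      simp only [Finset.mem_range] at hp
      by_cases h1 : p = i
      · subst h1; simp [tI, hui, huj]
      · simp [tI, hup p h1 (by omega), huj, h1]
    rw [Finset.sum_congr rfl hterm, Finset.sum_add_distrib,
      Finset.sum_ite_eq' (Finset.range j) i (fun _ => tI u j i - tI u i i)]
    have hii : tI u i i = 0 := by simp [tI]
    simp only [Finset.mem_range, if_pos hij, hii]
    ring
  -- assemble, splitting every range-n sum at i and j
  rw [show totC u' n = ∑ q ∈ Finset.range n, colS u' q from rfl,
    show totC u n = ∑ q ∈ Finset.range n, colS u q from rfl,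
    split2 (fun q => colS u' q) n i j hij hj, split2 (fun q => colS u q) n i j hij hj]
  have hA : ∑ q ∈ Finset.range i, colS u' q = ∑ q ∈ Finset.range i, colS u q := by
    apply Finset.sum_congr rfl
    intro q hq
    simp only [Finset.mem_range] at hq
    rw [hcol q (by omega) (by omega)]
    simp [show ¬ i < q by omega, show ¬ j < q by omega]
  have hB : ∑ q ∈ Finset.Ico (i + 1) j, colS u' q
      = ∑ q ∈ Finset.Ico (i + 1) j, (colS u q + (tI u j q - tI u i q)) := by
    apply Finset.sum_congr rfl
    intro q hq
    simp only [Finset.mem_Ico] at hq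
    rw [hcol q (by omega) (by omega)]
    simp [show i < q by omega, show ¬ j < q by omega]
  have hC : ∑ q ∈ Finset.Ico (j + 1) n, colS u' q = ∑ q ∈ Finset.Ico (j + 1) n, colS u q := by
    apply Finset.sum_congr rfl
    intro q hq
    simp only [Finset.mem_Ico] at hq
    rw [hcol q (by omega) (by omega)]
    simp [show i < q by omega, show j < q by omega]
    ring
  rw [hA, hB, hC, hcoli, hcolj]
  -- split the two interior column sums of the unswapped list at p = i
  have hsplit1 : ∑ p ∈ Finset.range j, tI u p i
      = ∑ p ∈ Finset.range i, tI u p i + tI u i i + ∑ p ∈ Finset.Ico (i + 1) j, tI u p i :=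
    splitRange (fun p => tI u p i) j i hij
  have hsplit2 : colS u j
      = ∑ p ∈ Finset.range i, tI u p j + tI u i j + ∑ p ∈ Finset.Ico (i + 1) j, tI u p j :=
    splitRange (fun p => tI u p j) j i hij
  have hii : tI u i i = 0 := by simp [tI]
  rw [hsplit1, hsplit2, hii]
  rw [show colS u i = ∑ p ∈ Finset.range i, tI u p i from rfl]
  unfold ΔI
  simp only [Finset.sum_add_distrib, Finset.sum_sub_distrib]
  ring

-- one greedy step: A's recompute-and-compare equals B's incremental delta test
def stepA (st : List Int × Int) (i j : Nat) : List Int × Int :=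
  let s' := pySwapA st.1 i j
  let nc := calc_cost s'
  if nc < st.2 then (s', nc) else (pySwapA s' i j, st.2)

def stepB (st : List Int × Int) (i j : Nat) : List Int × Int :=
  let a := st.1.getD i 0
  let b := st.1.getD j 0
  let d := deltaB st.1 i j
  if d < 0 then ((st.1.set i b).set j a, st.2 + d) else st

lemma step_eq (n : Nat) (st : List Int × Int) (i j : Nat) (hij : i < j) (hj : j < n)
    (hlen : st.1.length = n) (hc : st.2 = totC (uL st.1) n) :
    stepA st i j = stepB st i j ∧ (stepB st i j).1.length = n
      ∧ (stepB st i j).2 = totC (uL (stepB st i j).1) n := by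
  obtain ⟨s, c⟩ := st
  simp only at hlen hc
  have hi' : i < s.length := by omega
  have hj' : j < s.length := by omega
  have hcost : calc_cost (pySwapA s i j) = c + deltaB s i j := by
    rw [calc_cost_eq, len_swap, hlen, uL_swap s i j hi' hj', totC_swap (uL s) n i j hij hj,
      deltaB_eq s i j hij, hc]
  have hswap : (s.set i (s.getD j 0)).set j (s.getD i 0) = pySwapA s i j := rfl
  simp only [stepA, stepB, hcost, hswap]
  by_cases hd : deltaB s i j < 0
  · rw [if_pos (by omega : c + deltaB s i j < c), if_pos hd]
    refine ⟨rfl, by simp [len_swap, hlen], ?_⟩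
    simp only
    rw [calc_cost_eq, len_swap, hlen] at hcost
    exact hcost.symm
  · rw [if_neg (by omega : ¬ c + deltaB s i j < c), if_neg hd]
    exact ⟨by rw [swap_swap s i j hi' hj' (by omega)], hlen, hc⟩

lemma foldpairs_eq (n : Nat) (L : List (Nat × Nat)) (hL : ∀ p ∈ L, p.1 < p.2 ∧ p.2 < n) :
    ∀ st : List Int × Int, st.1.length = n → st.2 = totC (uL st.1) n →
      L.foldl (fun st p => stepA st p.1 p.2) st = L.foldl (fun st p => stepB st p.1 p.2) st := by
  induction L with
  | nil => intro st _ _; rfl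
  | cons hd tl ih =>
      intro st hlen hc
      obtain ⟨h1, h2⟩ := hL hd (List.mem_cons_self)
      obtain ⟨heq, hlen', hc'⟩ := step_eq n st hd.1 hd.2 h1 h2 hlen hc
      simp only [List.foldl_cons, heq]
      exact ih (fun p hp => hL p (List.mem_cons_of_mem hd hp)) _ hlen' hc'

theorem state_generator_steepest_ascent_spec : Claim_equal_state_generator_steepest_ascent := by
  intro s _
  show state_generator_steepest_ascent s = state_generator_steepest_ascent_alt s
  have hA : state_generator_steepest_ascent s
      = (List.range s.length).foldl (fun st i =>
          (List.range' (i + 1) (s.length - (i + 1))).foldl (fun st j => stepA st i j) st)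
        (s, calc_cost s) := rfl
  have hB : state_generator_steepest_ascent_alt s
      = (List.range s.length).foldl (fun st i =>
          (List.range' (i + 1) (s.length - (i + 1))).foldl (fun st j => stepB st i j) st)
        (s, invCountB s) := rfl
  rw [hA, hB, foldl_nested, foldl_nested]
  have hinit : invCountB s = calc_cost s := by rw [invCountB_eq, calc_cost_eq]
  rw [hinit]
  apply foldpairs_eq s.length
  · intro p hp
    simp only [List.mem_flatMap, List.mem_map, List.mem_range, List.mem_range'_1] at hp
    obtain ⟨i, hi, j, hj, rfl⟩ := hp
    simp only
    omega
  · rfl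
  · simp only
    rw [calc_cost_eq]
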